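-- pv_equiv track=rewrite | github.com/boterop/html2object | html2object/html2object.py | _fix_attrs
-- ===== SOURCE A (Python) =====
-- def _fix_attrs(attrs: list) -> list:
--     no_splitable = [",", ":", ";"]
--     new_list = []
--     mix = None
--     for attr in attrs:
--         if attr.strip() != "":
--             if mix:
--                 attr = f"{mix} {attr}"
--                 mix = None
--             if attr.strip()[-1] in no_splitable:
--                 mix = attr
--             else:
--                 new_list.append(attr)
--     return new_list
-- ===== SOURCE B (Python) =====
-- def _fix_attrs(attrs: list) -> list:
--     pieces = [a for a in attrs if a.strip() != ""]
--     out = []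
--     n = len(pieces)
--     i = 0
--     while i < n:
--         # advance j to the first piece of the group not ending in a separator
--         j = i
--         while j < n and pieces[j].strip()[-1] in ",:;":
--             j += 1
--         if j == n:
--             break  # trailing separator-ended run: dropped
--         out.append(" ".join(pieces[i:j + 1]))
--         i = j + 1
--     return out
-- ===== Notes on version B (the rewrite author's own statement) =====
-- stated objective: alternative
-- what changed: A is a single stateful pass threading a 'mix' string through f-string concatenation; B first filters blanks, then repeatedly splits the list at the first fragment not ending in a separator with a two-pointer scan, emitting each whole group as one slice join, with no running string state.
import Mathlib
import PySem

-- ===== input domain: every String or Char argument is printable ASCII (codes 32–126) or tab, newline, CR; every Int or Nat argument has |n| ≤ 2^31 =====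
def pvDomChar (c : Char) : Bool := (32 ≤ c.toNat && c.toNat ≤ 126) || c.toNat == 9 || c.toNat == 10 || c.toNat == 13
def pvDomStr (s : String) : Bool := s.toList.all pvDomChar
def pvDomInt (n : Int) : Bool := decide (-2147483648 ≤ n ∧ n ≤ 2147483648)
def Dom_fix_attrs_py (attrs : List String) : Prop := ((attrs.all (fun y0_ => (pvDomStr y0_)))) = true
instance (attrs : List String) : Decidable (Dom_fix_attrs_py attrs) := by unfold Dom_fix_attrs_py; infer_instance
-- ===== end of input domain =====

-- B replaces A's one-pass state machine (a threaded `mix` string) with a group-splitting scan: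
-- it filters blanks, then repeatedly splits the list at the first fragment not ending in a
-- separator and emits that whole prefix space-joined (alternative decomposition, same cost).

-- ===== PORT A =====
-- one iteration of A's for-loop; state = (new_list, mix)
def fixAttrsStepA (st : List String × Option String) (attr : String) : List String × Option String :=
  if PySem.Str.strip attr ≠ "" then
    -- `if mix:` — truthy iff mix is not None and not ""
    let p : String × Option String :=
      match st.2 with
      | some m => if m ≠ "" then (m ++ " " ++ attr, none) else (attr, st.2)
      | none => (attr, st.2)
    -- attr.strip()[-1]
    match PySem.Str.pyGet? (PySem.Str.strip p.1) (-1) with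
    | some c => if c = ',' ∨ c = ':' ∨ c = ';' then (st.1, some p.1) else (st.1 ++ [p.1], p.2)
    | none => st -- unreachable here (Python would raise IndexError on an empty strip)
  else st

def fix_attrs_py (attrs : List String) : List String :=
  (attrs.foldl fixAttrsStepA ([], none)).1

-- ===== PORT B =====
-- B's inner while-loop test: pieces[j].strip()[-1] in ",:;"
def fixAttrsSep (p : String) : Bool :=
  match PySem.Str.pyGet? (PySem.Str.strip p) (-1) with
  | some c => c = ',' || c = ':' || c = ';'
  | none => false -- unreachable: go only ever sees non-blank pieces

-- B's outer while loop, as structural recursion on the suffix pieces[i:]: the inner loop's j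
-- splits it as takeWhile/dropWhile at the first non-separator piece; pieces[i:j+1] joined is
-- emitted, then the loop continues from j+1 (break at the end = trailing run dropped)
def fixAttrsGo (ps : List String) : List String :=
  match h : ps.dropWhile fixAttrsSep with
  | [] => []
  | p :: rest' => PySem.Str.join " " (ps.takeWhile fixAttrsSep ++ [p]) :: fixAttrsGo rest'
termination_by ps.length
decreasing_by
  have h1 : (ps.dropWhile fixAttrsSep).length ≤ ps.length := (List.dropWhile_sublist _).length_le
  rw [h] at h1; simp at h1; omega

def fix_attrs_py_alt (attrs : List String) : List String :=
  fixAttrsGo (attrs.filter (fun a => PySem.Str.strip a != ""))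

-- ===== PRECONDITION & SPEC =====
def Spec_fix_attrs_py (attrs : List String) (out : List String) : Prop := out = fix_attrs_py_alt attrs
instance (attrs : List String) (out : List String) : Decidable (Spec_fix_attrs_py attrs out) := by unfold Spec_fix_attrs_py; infer_instance

-- ===== CLAIM (what is proved, stated in full; the proofs are below) =====
def Claim_equal_fix_attrs_py : Prop := ∀ (attrs : List String), Dom_fix_attrs_py attrs → Spec_fix_attrs_py attrs (fix_attrs_py attrs)

-- ===== LEMMAS AND PROOFS =====

-- last char of strip, seen from the right: head of the reversed list with whitespace dropped
lemma strip_getLast?_eq (x : List Char) :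
    (PySem.Chars.strip x).getLast? =
      (x.reverse.dropWhile PySem.Chars.isspace).head? := by
  unfold PySem.Chars.strip PySem.Chars.rstrip PySem.Chars.lstrip
  rw [List.getLast?_reverse]
  conv_rhs => rw [← List.takeWhile_append_dropWhile (p := PySem.Chars.isspace) (l := x)]
  rw [List.reverse_append, List.dropWhile_append]
  by_cases h : (List.dropWhile PySem.Chars.isspace (List.dropWhile PySem.Chars.isspace x).reverse) = []
  · have h2 : List.dropWhile PySem.Chars.isspace (List.takeWhile PySem.Chars.isspace x).reverse = [] :=
      List.dropWhile_eq_nil_iff.mpr (fun a ha => List.mem_takeWhile_imp (List.mem_reverse.mp ha))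
    simp [h, h2]
  · simp [h, List.head?_append_of_ne_nil _ h]

-- a nonempty strip means a non-whitespace char survives from the right
lemma dropWhile_rev_ne_nil (ds : List Char) (h : PySem.Chars.strip ds ≠ []) :
    ds.reverse.dropWhile PySem.Chars.isspace ≠ [] := by
  intro hc
  have := strip_getLast?_eq ds
  rw [hc] at this
  simp only [List.head?_nil] at this
  exact h (by simpa using List.getLast?_eq_none_iff.mp this)

-- prepending anything does not change the last stripped char, as long as the tail has one
lemma strip_getLast?_append (cs ds : List Char) (h : PySem.Chars.strip ds ≠ []) :
    (PySem.Chars.strip (cs ++ ds)).getLast? = (PySem.Chars.strip ds).getLast? := by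
  have hd := dropWhile_rev_ne_nil ds h
  rw [strip_getLast?_eq, strip_getLast?_eq, List.reverse_append, List.dropWhile_append]
  simp [hd, List.head?_append_of_ne_nil _ hd]

-- intercalate unrolled one step
lemma inter_cc (sep a b : List Char) (bs : List (List Char)) :
    List.intercalate sep (a :: b :: bs) = a ++ sep ++ List.intercalate sep (b :: bs) := by
  simp only [List.intercalate, List.intersperse, List.flatten_cons, List.append_assoc]

-- join with sep over xs ++ [y] for nonempty xs
lemma join_append_singleton (sep y : List Char) (xs : List (List Char)) (h : xs ≠ []) :
    PySem.Chars.join sep (xs ++ [y]) = PySem.Chars.join sep xs ++ sep ++ y := by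
  unfold PySem.Chars.join
  induction xs with
  | nil => simp at h
  | cons a as ih =>
    cases as with
    | nil => simp [List.intercalate, List.intersperse]
    | cons b bs =>
      simp only [List.cons_append] at ih ⊢
      rw [inter_cc, inter_cc, ih (by simp)]
      simp [List.append_assoc]

-- String-level versions used by the step proof
lemma str_join_append_singleton (y : String) (xs : List String) (h : xs ≠ []) :
    PySem.Str.join " " (xs ++ [y]) = PySem.Str.join " " xs ++ " " ++ y := by
  unfold PySem.Str.join
  apply String.toList_injective
  simp only [String.toList_append, String.toList_ofList]
  rw [List.map_append, List.map_singleton, join_append_singleton _ _ _ (by simpa using h)]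

lemma str_join_singleton (y : String) : PySem.Str.join " " [y] = y := by
  apply String.toList_injective
  simp [PySem.Str.join, PySem.Chars.join, List.intercalate]

-- strip on String vs on toList
lemma str_strip_ne_iff (s : String) :
    PySem.Str.strip s ≠ "" ↔ PySem.Chars.strip s.toList ≠ [] := by
  unfold PySem.Str.strip
  constructor
  · intro h hc; exact h (by simp [hc])
  · intro h hc
    apply h
    have := congrArg String.toList hc
    simpa using this

-- attr.strip()[-1] is defined when strip is nonempty
lemma pyget_strip_some (s : String) (h : PySem.Str.strip s ≠ "") :
    ∃ c, PySem.Str.pyGet? (PySem.Str.strip s) (-1) = some c := by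
  have hne : PySem.Chars.strip s.toList ≠ [] := (str_strip_ne_iff s).mp h
  have : (PySem.Str.strip s).toList.getLast?.isSome := by
    simp only [PySem.Str.strip, String.toList_ofList]
    simpa [List.getLast?_isSome] using hne
  rcases Option.isSome_iff_exists.mp this with ⟨c, hc⟩
  refine ⟨c, ?_⟩
  simp only [PySem.Str.pyGet?, PySem.Chars.pyGet?_eq_listPyGet?, PySem.List.pyGet?_neg_one]
  exact hc

-- A's test char on the merged string equals B's test char on the raw piece
lemma pyget_strip_append (m piece : String) (h : PySem.Str.strip piece ≠ "") :
    PySem.Str.pyGet? (PySem.Str.strip (m ++ " " ++ piece)) (-1) =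
      PySem.Str.pyGet? (PySem.Str.strip piece) (-1) := by
  have hne : PySem.Chars.strip piece.toList ≠ [] := (str_strip_ne_iff piece).mp h
  simp only [PySem.Str.pyGet?, PySem.Str.strip, String.toList_ofList,
    PySem.Chars.pyGet?_eq_listPyGet?, PySem.List.pyGet?_neg_one, String.toList_append]
  rw [strip_getLast?_append _ _ hne]

-- strip of the merged string is nonempty when the new tail's strip is
lemma strip_append_ne (m piece : String) (h : PySem.Str.strip piece ≠ "") :
    PySem.Str.strip (m ++ " " ++ piece) ≠ "" := by
  rw [str_strip_ne_iff] at h ⊢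
  intro hc
  have he : (m ++ " " ++ piece).toList = (m.toList ++ " ".toList) ++ piece.toList := by
    simp [String.toList_append]
  have h2 := strip_getLast?_append (m.toList ++ " ".toList) piece.toList h
  rw [← he, hc] at h2
  simp only [List.getLast?_nil] at h2
  exact h (List.getLast?_eq_none_iff.mp h2.symm)

-- A's mix as a function of the pending (non-blank) pieces it has absorbed
def mixOf : List String → Option String
  | [] => none
  | buf => some (PySem.Str.join " " buf)

-- the running invariant on a buffer: empty, or its join strips nonempty
def GoodBuf (buf : List String) : Prop :=
  buf = [] ∨ PySem.Str.strip (PySem.Str.join " " buf) ≠ ""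

-- blank attrs are skipped by A's step, so A's fold runs over the filtered list
lemma foldA_filter (attrs : List String) : ∀ st,
    attrs.foldl fixAttrsStepA st =
      (attrs.filter (fun a => PySem.Str.strip a != "")).foldl fixAttrsStepA st := by
  induction attrs with
  | nil => intro st; rfl
  | cons a rest ih =>
    intro st
    rcases eq_or_ne (PySem.Str.strip a) "" with hbl | hne
    · rw [List.filter_cons_of_neg (by simp [hbl]), List.foldl_cons,
        show fixAttrsStepA st a = st from by simp [fixAttrsStepA, hbl]]
      exact ih st
    · rw [List.filter_cons_of_pos (by simp [hne]), List.foldl_cons, List.foldl_cons]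
      exact ih _

-- unfolding fixAttrsGo when every piece ends in a separator
lemma fixAttrsGo_nil (ps : List String) (h : ps.dropWhile fixAttrsSep = []) :
    fixAttrsGo ps = [] := by
  rw [fixAttrsGo]
  split
  · rfl
  · rename_i p rest' heq; rw [h] at heq; cases heq

-- unfolding fixAttrsGo at the first non-separator piece
lemma fixAttrsGo_cons (ps : List String) (p : String) (rest' : List String)
    (h : ps.dropWhile fixAttrsSep = p :: rest') :
    fixAttrsGo ps = PySem.Str.join " " (ps.takeWhile fixAttrsSep ++ [p]) :: fixAttrsGo rest' := by
  rw [fixAttrsGo]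
  split
  · rename_i heq; rw [h] at heq; cases heq
  · rename_i q r heq; rw [h] at heq; cases heq; rfl

-- absorbing one separator-ended non-blank piece into the pending mix
lemma stepA_sep (q : String) (hq : PySem.Str.strip q ≠ "") (hsep : fixAttrsSep q = true)
    (res : List String) (buf : List String) (hg : GoodBuf buf) :
    fixAttrsStepA (res, mixOf buf) q = (res, mixOf (buf ++ [q])) ∧ GoodBuf (buf ++ [q]) := by
  obtain ⟨c, hc⟩ := pyget_strip_some q hq
  have hcsep : c = ',' ∨ c = ':' ∨ c = ';' := by
    rw [fixAttrsSep, hc] at hsep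
    simpa [Bool.or_eq_true, or_assoc] using hsep
  rcases hg with hb | hb
  · subst hb
    refine ⟨?_, Or.inr (by rw [List.nil_append, str_join_singleton]; exact hq)⟩
    simp only [mixOf, List.nil_append, str_join_singleton]
    simp [PySem.Str.pyGet?, PySem.Str.strip] at hc
    simp [fixAttrsStepA, hq, hc, hcsep]
  · have hbne : buf ≠ [] := by rintro rfl; exact hb (by decide)
    have hmne : PySem.Str.join " " buf ≠ "" := by intro h0; apply hb; rw [h0]; decide
    have hmerge : PySem.Str.join " " buf ++ " " ++ q = PySem.Str.join " " (buf ++ [q]) :=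
      (str_join_append_singleton q buf hbne).symm
    have htest : PySem.Str.pyGet? (PySem.Str.strip (PySem.Str.join " " buf ++ " " ++ q)) (-1) = some c := by
      rw [pyget_strip_append _ q hq]; exact hc
    have hmix : mixOf buf = some (PySem.Str.join " " buf) := by
      cases buf with
      | nil => exact absurd rfl hbne
      | cons x xs => rfl
    refine ⟨?_, Or.inr (by rw [← hmerge]; exact strip_append_ne _ q hq)⟩
    have hmix2 : mixOf (buf ++ [q]) = some (PySem.Str.join " " (buf ++ [q])) := by
      cases buf with
      | nil => exact absurd rfl hbne
      | cons x xs => rfl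
    rw [hmix, hmix2, ← hmerge]
    simp [PySem.Str.pyGet?, PySem.Str.strip, PySem.Str.join] at htest
    simp [fixAttrsStepA, hq, hmne, htest, hcsep]

-- a whole run of separator-ended pieces just grows the pending mix
lemma foldA_sep_run (pre : List String)
    (hpre : ∀ p ∈ pre, PySem.Str.strip p ≠ "" ∧ fixAttrsSep p = true) :
    ∀ res buf, GoodBuf buf →
      pre.foldl fixAttrsStepA (res, mixOf buf) = (res, mixOf (buf ++ pre)) ∧ GoodBuf (buf ++ pre) := by
  induction pre with
  | nil => intro res buf hg; exact ⟨by simp, by simpa using hg⟩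
  | cons q pre' ih =>
    intro res buf hg
    obtain ⟨hq, hsep⟩ := hpre q (by simp)
    obtain ⟨hstep, hg'⟩ := stepA_sep q hq hsep res buf hg
    rw [List.foldl_cons, hstep]
    obtain ⟨h1, h2⟩ := ih (fun p hp => hpre p (by simp [hp])) res (buf ++ [q]) hg'
    exact ⟨by rw [h1]; simp, by simpa using h2⟩

-- emitting: a non-blank piece NOT ending in a separator flushes the pending mix
lemma stepA_emit (p : String) (hp : PySem.Str.strip p ≠ "") (hsep : fixAttrsSep p = false)
    (res : List String) (buf : List String) (hg : GoodBuf buf) :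
    fixAttrsStepA (res, mixOf buf) p = (res ++ [PySem.Str.join " " (buf ++ [p])], none) := by
  obtain ⟨c, hc⟩ := pyget_strip_some p hp
  have hcsep : ¬ (c = ',' ∨ c = ':' ∨ c = ';') := by
    rw [fixAttrsSep, hc] at hsep
    intro hcon
    rcases hcon with h | h | h <;> simp [h] at hsep
  rcases hg with hb | hb
  · subst hb
    rw [List.nil_append, str_join_singleton]
    simp [PySem.Str.pyGet?, PySem.Str.strip] at hc
    simp [fixAttrsStepA, hp, hc, hcsep, mixOf]
  · have hbne : buf ≠ [] := by rintro rfl; exact hb (by decide)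
    have hmne : PySem.Str.join " " buf ≠ "" := by intro h0; apply hb; rw [h0]; decide
    have hmerge : PySem.Str.join " " buf ++ " " ++ p = PySem.Str.join " " (buf ++ [p]) :=
      (str_join_append_singleton p buf hbne).symm
    have htest : PySem.Str.pyGet? (PySem.Str.strip (PySem.Str.join " " buf ++ " " ++ p)) (-1) = some c := by
      rw [pyget_strip_append _ p hp]; exact hc
    have hmix : mixOf buf = some (PySem.Str.join " " buf) := by
      cases buf with
      | nil => exact absurd rfl hbne
      | cons x xs => rfl
    rw [hmix, ← hmerge]
    simp [PySem.Str.pyGet?, PySem.Str.strip, PySem.Str.join] at htest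
    simp [fixAttrsStepA, hp, hmne, htest, hcsep]

-- main bridge: A's fold over the (non-blank) pieces equals B's group-splitting loop
lemma foldA_eq_go (n : Nat) : ∀ (ps : List String), ps.length ≤ n →
    (∀ p ∈ ps, PySem.Str.strip p ≠ "") →
    ∀ res, (ps.foldl fixAttrsStepA (res, none)).1 = res ++ fixAttrsGo ps := by
  induction n with
  | zero =>
    intro ps hlen _ res
    have : ps = [] := List.length_eq_zero_iff.mp (Nat.le_zero.mp hlen)
    subst this
    rw [fixAttrsGo_nil [] rfl]; simp
  | succ n ih =>
    intro ps hlen hnb res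
    have hsplit : ps.takeWhile fixAttrsSep ++ ps.dropWhile fixAttrsSep = ps :=
      List.takeWhile_append_dropWhile
    have hpre : ∀ p ∈ ps.takeWhile fixAttrsSep, PySem.Str.strip p ≠ "" ∧ fixAttrsSep p = true :=
      fun p hp => ⟨hnb p ((List.takeWhile_sublist _).mem hp), List.mem_takeWhile_imp hp⟩
    rcases hrest : ps.dropWhile fixAttrsSep with _ | ⟨p, rest'⟩
    · -- every piece ends in a separator: A emits nothing, go returns []
      have hps : ps.takeWhile fixAttrsSep = ps := by
        have h := hsplit; rw [hrest, List.append_nil] at h; exact h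
      have hpre' : ∀ p ∈ ps, PySem.Str.strip p ≠ "" ∧ fixAttrsSep p = true :=
        fun p hp => hpre p (by rw [hps]; exact hp)
      obtain ⟨h1, _⟩ := foldA_sep_run ps hpre' res [] (Or.inl rfl)
      have h1' : ps.foldl fixAttrsStepA (res, none) = (res, mixOf ([] ++ ps)) := h1
      rw [h1', fixAttrsGo_nil ps hrest]; simp
    · -- first non-separator piece p: flush takeWhile ++ [p], recurse on rest'
      have hpmem : p ∈ ps := (List.dropWhile_sublist _).mem (by rw [hrest]; simp)
      have hpsep : fixAttrsSep p = false := by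
        have := List.head_dropWhile_not fixAttrsSep (l := ps) (by simp [hrest])
        simpa [hrest] using this
      have hps : ps = ps.takeWhile fixAttrsSep ++ p :: rest' := by
        conv_lhs => rw [← hsplit, hrest]
      obtain ⟨h1, h2⟩ := foldA_sep_run (ps.takeWhile fixAttrsSep) hpre res [] (Or.inl rfl)
      simp only [List.nil_append] at h1 h2
      have h1' : (ps.takeWhile fixAttrsSep).foldl fixAttrsStepA (res, none)
          = (res, mixOf (ps.takeWhile fixAttrsSep)) := h1
      have hemit := stepA_emit p (hnb p hpmem) hpsep res (ps.takeWhile fixAttrsSep) h2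
      have hlen' : rest'.length ≤ n := by
        have := (List.dropWhile_sublist (l := ps) fixAttrsSep).length_le
        rw [hrest] at this; simp at this; omega
      have hnb' : ∀ q ∈ rest', PySem.Str.strip q ≠ "" :=
        fun q hq => hnb q ((List.dropWhile_sublist _).mem (by rw [hrest]; simp [hq]))
      conv_lhs => rw [hps]
      rw [List.foldl_append, List.foldl_cons, h1', hemit, ih rest' hlen' hnb',
        fixAttrsGo_cons ps p rest' hrest]
      simp

-- ===== VERDICT (by name: the statement is the Claim_ definition above) =====
theorem fix_attrs_py_spec : Claim_equal_fix_attrs_py := by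
  intro attrs _
  unfold Spec_fix_attrs_py fix_attrs_py fix_attrs_py_alt
  rw [foldA_filter]
  have hnb : ∀ p ∈ attrs.filter (fun a => PySem.Str.strip a != ""),
      PySem.Str.strip p ≠ "" := by
    intro p hp
    have := List.of_mem_filter hp
    simpa using this
  simpa using foldA_eq_go (attrs.filter (fun a => PySem.Str.strip a != "")).length _ le_rfl hnb []
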